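-- pv_equiv track=rewrite | github.com/YuzhouCheng66/abstraction-recovery | svd_abstraction/residual_abstraction.py | ordered_groups_from_ids
-- ===== SOURCE A (Python) =====
-- def ordered_groups_from_ids(ids, group_size, tail_heavy=True):
--     if group_size <= 0:
--         raise ValueError("group_size must be positive")
--     if not ids:
--         return []
--
--     if not tail_heavy:
--         return [ids[start : start + group_size] for start in range(0, len(ids), group_size)]
--
--     groups = []
--     start = 0
--     while start + 2 * group_size <= len(ids):
--         groups.append(ids[start : start + group_size])
--         start += group_size
--     groups.append(ids[start:])
--     return [group for group in groups if group]
-- ===== SOURCE B (Python) =====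
-- def ordered_groups_from_ids(ids, group_size, tail_heavy=True):
--     if group_size <= 0:
--         raise ValueError("group_size must be positive")
--     chunks = [ids[start : start + group_size] for start in range(0, len(ids), group_size)]
--     if tail_heavy and len(ids) % group_size != 0 and len(chunks) > 1:
--         last = chunks.pop()
--         chunks[-1] = chunks[-1] + last
--     return chunks
-- ===== Notes on version B (the rewrite author's own statement) =====
-- stated objective: simpler
-- what changed: Replaces A's lookahead while-loop (condition on 2*group_size) plus final empty-group filter by the uniform slice chunking A already uses for tail_heavy=False, followed by a single merge of a partial final chunk into its predecessor.
import Mathlib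
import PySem

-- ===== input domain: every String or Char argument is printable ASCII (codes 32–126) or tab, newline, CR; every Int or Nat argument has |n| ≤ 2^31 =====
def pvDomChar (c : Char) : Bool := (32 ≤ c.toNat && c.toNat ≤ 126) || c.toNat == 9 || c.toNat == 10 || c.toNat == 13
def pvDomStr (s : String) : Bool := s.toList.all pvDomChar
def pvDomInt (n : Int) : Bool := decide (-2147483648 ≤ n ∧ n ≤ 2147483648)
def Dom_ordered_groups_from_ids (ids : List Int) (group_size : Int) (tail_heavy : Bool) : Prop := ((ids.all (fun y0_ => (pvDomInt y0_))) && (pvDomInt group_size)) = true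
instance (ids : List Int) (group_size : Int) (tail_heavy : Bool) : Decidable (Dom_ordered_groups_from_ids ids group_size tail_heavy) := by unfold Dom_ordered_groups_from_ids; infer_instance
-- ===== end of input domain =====

-- B replaces A's lookahead while-loop by the uniform chunking A already uses for tail_heavy=False,
-- followed by a one-step merge of a partial final chunk into its predecessor (objective: simpler).

-- ===== PORT A =====
-- the while loop: 'while start + 2 * group_size <= len(ids): groups.append(ids[start:start+group_size]); start += group_size'
-- followed by 'groups.append(ids[start:])'.  The '0 < g' conjunct is a totality guard only: A reaches the
-- loop only after raising on group_size <= 0, i.e. only with 0 < g.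
def pvLoopA (ids : List Int) (g : Int) (start : Int) (groups : List (List Int)) : List (List Int) :=
  if h : 0 < g ∧ start + 2 * g ≤ (ids.length : Int) then
    pvLoopA ids g (start + g) (groups ++ [PySem.List.slice ids (some start) (some (start + g))])
  else
    groups ++ [PySem.List.slice ids (some start) none]
termination_by ((ids.length : Int) - start).toNat
decreasing_by omega

def ordered_groups_from_ids (ids : List Int) (group_size : Int) (tail_heavy : Bool) : List (List Int) :=
  if group_size ≤ 0 then []   -- raise ValueError (excluded by Pre_)
  else if ids = [] then []
  else if !tail_heavy then
    (PySem.List.pyRange 0 (ids.length : Int) group_size).map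
      (fun start => PySem.List.slice ids (some start) (some (start + group_size)))
  else
    (pvLoopA ids group_size 0 []).filter (fun grp => !grp.isEmpty)

-- ===== PORT B =====
def ordered_groups_from_ids_alt (ids : List Int) (group_size : Int) (tail_heavy : Bool) : List (List Int) :=
  if group_size ≤ 0 then []   -- raise ValueError (excluded by Pre_)
  else
    let chunks := (PySem.List.pyRange 0 (ids.length : Int) group_size).map
      (fun start => PySem.List.slice ids (some start) (some (start + group_size)))
    if tail_heavy && decide (PySem.Int.mod (ids.length : Int) group_size ≠ 0)
        && decide (1 < chunks.length) then
      -- last = chunks.pop(); chunks[-1] = chunks[-1] + last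
      let last := chunks.getD (chunks.length - 1) []
      let rest := chunks.dropLast
      rest.take (rest.length - 1) ++ [rest.getD (rest.length - 1) [] ++ last]
    else chunks

-- ===== PRECONDITION & SPEC =====
-- Pre_ excludes exactly group_size <= 0, where A raises ValueError.
def Pre_ordered_groups_from_ids (ids : List Int) (group_size : Int) (tail_heavy : Bool) : Prop :=
  0 < group_size
instance (ids : List Int) (group_size : Int) (tail_heavy : Bool) : Decidable (Pre_ordered_groups_from_ids ids group_size tail_heavy) := by unfold Pre_ordered_groups_from_ids; infer_instance

def pvWitness_ordered_groups_from_ids : List Int × Int × Bool := ([1, 2, 3, 4, 5], 2, true)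

def Spec_ordered_groups_from_ids (ids : List Int) (group_size : Int) (tail_heavy : Bool) (out : List (List Int)) : Prop := out = ordered_groups_from_ids_alt ids group_size tail_heavy
instance (ids : List Int) (group_size : Int) (tail_heavy : Bool) (out : List (List Int)) : Decidable (Spec_ordered_groups_from_ids ids group_size tail_heavy out) := by unfold Spec_ordered_groups_from_ids; infer_instance

-- ===== CLAIM (what is proved, stated in full; the proofs are below) =====
def Claim_equal_ordered_groups_from_ids : Prop := ∀ (ids : List Int) (group_size : Int) (tail_heavy : Bool), Dom_ordered_groups_from_ids ids group_size tail_heavy → Pre_ordered_groups_from_ids ids group_size tail_heavy → Spec_ordered_groups_from_ids ids group_size tail_heavy (ordered_groups_from_ids ids group_size tail_heavy)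

-- ===== LEMMAS AND PROOFS =====

-- reference chunking: successive groups of gn elements
def chunksOf (gn : Nat) (ids : List Int) : List (List Int) :=
  if h : 0 < gn ∧ ids ≠ [] then ids.take gn :: chunksOf gn (ids.drop gn) else []
termination_by ids.length
decreasing_by
  simp only [List.length_drop]
  have := List.length_pos_iff.mpr h.2
  omega

-- reference form of A's loop: groups of gn, last group absorbs the remainder
def tailG (gn : Nat) (ids : List Int) : List (List Int) :=
  if h : 0 < gn ∧ 2 * gn ≤ ids.length then ids.take gn :: tailG gn (ids.drop gn) else [ids]
termination_by ids.length
decreasing_by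
  simp only [List.length_drop]
  omega

-- B's merge step, as the port writes it
def mergeLast (c : List (List Int)) : List (List Int) :=
  let last := c.getD (c.length - 1) []
  let rest := c.dropLast
  rest.take (rest.length - 1) ++ [rest.getD (rest.length - 1) [] ++ last]

lemma pyRange_pos_nil (a b g : Int) (hg : 0 < g) (hba : b ≤ a) :
    PySem.List.pyRange a b g = [] := by
  rw [PySem.List.pyRange_of_pos a b hg]
  simp [show ¬ a < b by omega]

lemma pyRange_pos_cons (a b g : Int) (hg : 0 < g) (hab : a < b) :
    PySem.List.pyRange a b g = a :: PySem.List.pyRange (a + g) b g := by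
  rw [PySem.List.pyRange_of_pos a b hg, PySem.List.pyRange_of_pos (a + g) b hg]
  by_cases h2 : a + g < b
  · have hq0 : 0 ≤ (b - a - 1) / g := Int.ediv_nonneg (by omega) (by omega)
    have hsum : (b - a + g - 1) / g = (b - a - 1) / g + 1 := by
      have := Int.add_mul_ediv_right (b - a - 1) 1 (show g ≠ 0 by omega)
      rw [show b - a + g - 1 = b - a - 1 + 1 * g by ring, this]
    have hsum2 : (b - (a + g) + g - 1) / g = (b - a - 1) / g := by ring_nf
    rw [if_pos hab, if_pos h2, hsum, hsum2,
      show ((b - a - 1) / g + 1).toNat = ((b - a - 1) / g).toNat + 1 by omega,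
      List.range_succ_eq_map]
    simp only [List.map_cons, List.map_map]
    congr 1
    · simp
    · apply List.map_congr_left
      intro k _
      simp only [Function.comp_apply]
      push_cast
      ring
  · -- one element left
    have h1 : (b - a + g - 1) / g = 1 := by
      have hle : 1 ≤ (b - a + g - 1) / g := by
        rw [Int.le_ediv_iff_mul_le hg]; omega
      have hlt : (b - a + g - 1) / g < 2 := by
        rw [Int.ediv_lt_iff_lt_mul hg]; omega
      omega
    rw [if_pos hab, if_neg h2, h1]
    simp

lemma chunks_eq (ids : List Int) (g : Int) (hg : 0 < g) :
    ∀ (k : Nat) (s : Int), 0 ≤ s → ids.length ≤ k + s.toNat →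
      (PySem.List.pyRange s (ids.length : Int) g).map
        (fun start => PySem.List.slice ids (some start) (some (start + g)))
      = chunksOf g.toNat (ids.drop s.toNat) := by
  intro k
  induction k with
  | zero =>
    intro s hs hk
    have hsn : (ids.length : Int) ≤ s := by omega
    rw [pyRange_pos_nil _ _ _ hg hsn]
    have : ids.drop s.toNat = [] := List.drop_eq_nil_of_le (by omega)
    rw [this, chunksOf]
    simp
  | succ k ih =>
    intro s hs hk
    by_cases hsn : s < (ids.length : Int)
    · rw [pyRange_pos_cons _ _ _ hg hsn, List.map_cons,
        ih (s + g) (by omega) (by omega)]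
      have hslice : PySem.List.slice ids (some s) (some (s + g))
          = (ids.drop s.toNat).take g.toNat := by
        rw [PySem.List.slice_toNat ids hs (by omega)]
        congr 1
        omega
      have hdropne : ids.drop s.toNat ≠ [] := by
        intro h
        have := List.drop_eq_nil_iff.mp h
        omega
      conv_rhs => rw [chunksOf]
      rw [dif_pos ⟨by omega, hdropne⟩]
      rw [hslice, List.drop_drop]
      have harg : s.toNat + g.toNat = (s + g).toNat := by omega
      rw [harg]
    · rw [pyRange_pos_nil _ _ _ hg (by omega)]
      have : ids.drop s.toNat = [] := List.drop_eq_nil_of_le (by omega)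
      rw [this, chunksOf]
      simp

lemma loopA_eq (ids : List Int) (g : Int) (hg : 0 < g) :
    ∀ (k : Nat) (s : Int) (groups : List (List Int)), 0 ≤ s → ids.length ≤ k + s.toNat →
      pvLoopA ids g s groups = groups ++ tailG g.toNat (ids.drop s.toNat) := by
  intro k
  induction k with
  | zero =>
    intro s groups hs hk
    rw [pvLoopA, dif_neg (by omega)]
    rw [tailG, dif_neg (by rintro ⟨h1, h2⟩; simp only [List.length_drop] at h2; omega)]
    rw [PySem.List.slice_from ids hs]
  | succ k ih =>
    intro s groups hs hk
    by_cases hc : s + 2 * g ≤ (ids.length : Int)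
    · rw [pvLoopA, dif_pos ⟨hg, hc⟩, ih (s + g) _ (by omega) (by omega)]
      conv_rhs => rw [tailG]
      rw [dif_pos ⟨by omega, by simp only [List.length_drop]; omega⟩]
      have hslice : PySem.List.slice ids (some s) (some (s + g))
          = (ids.drop s.toNat).take g.toNat := by
        rw [PySem.List.slice_toNat ids hs (by omega)]
        congr 1
        omega
      rw [hslice, List.drop_drop, List.append_assoc,
        show s.toNat + g.toNat = (s + g).toNat by omega]
      simp
    · rw [pvLoopA, dif_neg (by omega)]
      rw [tailG, dif_neg (by rintro ⟨h1, h2⟩; simp only [List.length_drop] at h2; omega)]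
      rw [PySem.List.slice_from ids hs]

lemma chunksOf_ne_nil (gn : Nat) (ids : List Int) (hg : 0 < gn) (hne : ids ≠ []) :
    chunksOf gn ids ≠ [] := by
  rw [chunksOf, dif_pos ⟨hg, hne⟩]
  simp

lemma chunksOf_len_gt (gn : Nat) (ids : List Int) (hg : 0 < gn) (hlt : gn < ids.length) :
    1 < (chunksOf gn ids).length := by
  rw [chunksOf, dif_pos ⟨hg, by intro h; simp [h] at hlt⟩]
  have : chunksOf gn (ids.drop gn) ≠ [] :=
    chunksOf_ne_nil gn _ hg (by intro h; have := List.drop_eq_nil_iff.mp h; omega)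
  simp only [List.length_cons]
  have := List.length_pos_iff.mpr this
  omega

lemma mergeLast_cons (c : List Int) (cs : List (List Int)) (h : 1 < cs.length) :
    mergeLast (c :: cs) = c :: mergeLast cs := by
  have hne : cs ≠ [] := by intro h'; simp [h'] at h
  have hd : cs.dropLast.length = cs.length - 1 := by simp
  simp only [mergeLast, List.dropLast_cons_of_ne_nil hne, List.length_cons]
  rw [show cs.length + 1 - 1 = (cs.length - 1) + 1 by omega, List.getD_cons_succ,
    show cs.dropLast.length + 1 - 1 = (cs.dropLast.length - 1) + 1 by omega,
    List.take_succ_cons, List.getD_cons_succ]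
  simp

lemma mergeLast_pair (a b : List Int) : mergeLast [a, b] = [a ++ b] := by
  simp [mergeLast]

lemma mod_sub_self (gn n : Nat) (h : gn ≤ n) : (n - gn) % gn = n % gn := by
  conv_rhs => rw [show n = n - gn + gn by omega]
  rw [Nat.add_mod_right]

lemma tailG_eq_merge (gn : Nat) (hg : 0 < gn) :
    ∀ (k : Nat) (ids : List Int), ids ≠ [] → ids.length ≤ k →
      tailG gn ids
        = if ids.length % gn ≠ 0 ∧ 1 < (chunksOf gn ids).length
          then mergeLast (chunksOf gn ids) else chunksOf gn ids := by
  intro k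
  induction k with
  | zero => intro ids hne hk; exact absurd (List.length_eq_zero_iff.mp (by omega)) hne
  | succ k ih =>
    intro ids hne hk
    have hpos : 0 < ids.length := List.length_pos_iff.mpr hne
    by_cases hbig : 2 * gn ≤ ids.length
    · -- loop case: take a full chunk from the front on both sides
      have hdropne : ids.drop gn ≠ [] := by
        intro h; have := List.drop_eq_nil_iff.mp h; omega
      rw [tailG, dif_pos ⟨hg, hbig⟩,
        ih (ids.drop gn) hdropne (by simp only [List.length_drop]; omega)]
      conv_rhs => rw [chunksOf, dif_pos ⟨hg, hne⟩]
      simp only [List.length_drop, mod_sub_self gn ids.length (by omega)]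
      by_cases hm : ids.length % gn = 0
      · -- exact multiple: no merge on either side
        simp [hm]
      · -- remainder: both sides merge, front chunk passes through
        have h2 : 2 * gn < ids.length := by
          rcases Nat.lt_or_ge (2 * gn) ids.length with h | h
          · exact h
          · exfalso
            have : ids.length = 2 * gn := by omega
            apply hm
            rw [this]
            simp
        have hsub : 1 < (chunksOf gn (ids.drop gn)).length := by
          apply chunksOf_len_gt gn _ hg
          simp only [List.length_drop]; omega
        have hsup : 1 < (ids.take gn :: chunksOf gn (ids.drop gn)).length := by
          simp only [List.length_cons]; omega
        rw [if_pos ⟨hm, hsub⟩, if_pos ⟨hm, hsup⟩, mergeLast_cons _ _ hsub]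
    · -- tail case: at most one full chunk plus remainder
      rw [tailG, dif_neg (by rintro ⟨_, h⟩; omega)]
      by_cases hle : ids.length ≤ gn
      · -- a single chunk
        have hdrop : ids.drop gn = [] := List.drop_eq_nil_of_le hle
        have hch : chunksOf gn ids = [ids] := by
          rw [chunksOf, dif_pos ⟨hg, hne⟩, hdrop, chunksOf]
          simp [List.take_of_length_le hle]
        rw [hch, if_neg (by rintro ⟨-, h2⟩; simp at h2)]
      · -- two chunks, merged back into one
        have hlt : gn < ids.length := by omega
        have hdropne : ids.drop gn ≠ [] := by
          intro h; have := List.drop_eq_nil_iff.mp h; omega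
        have hdrop2 : (ids.drop gn).drop gn = [] :=
          List.drop_eq_nil_of_le (by simp only [List.length_drop]; omega)
        have hch : chunksOf gn ids = [ids.take gn, ids.drop gn] := by
          rw [chunksOf, dif_pos ⟨hg, hne⟩]
          congr 1
          rw [chunksOf, dif_pos ⟨hg, hdropne⟩, hdrop2]
          rw [chunksOf, dif_neg (by simp)]
          rw [List.take_of_length_le (by simp only [List.length_drop]; omega)]
        have hm : ids.length % gn ≠ 0 := by
          rw [← mod_sub_self gn ids.length (by omega),
            Nat.mod_eq_of_lt (by omega)]
          omega
        rw [hch, if_pos ⟨hm, by simp⟩, mergeLast_pair, List.take_append_drop]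

lemma tailG_filter (gn : Nat) (hg : 0 < gn) :
    ∀ (k : Nat) (ids : List Int), ids ≠ [] → ids.length ≤ k →
      (tailG gn ids).filter (fun grp => !grp.isEmpty) = tailG gn ids := by
  intro k
  induction k with
  | zero => intro ids hne hk; exact absurd (List.length_eq_zero_iff.mp (by omega)) hne
  | succ k ih =>
    intro ids hne hk
    have hpos : 0 < ids.length := List.length_pos_iff.mpr hne
    by_cases hbig : 2 * gn ≤ ids.length
    · have hdropne : ids.drop gn ≠ [] := by
        intro h; have := List.drop_eq_nil_iff.mp h; omega
      rw [tailG, dif_pos ⟨hg, hbig⟩]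
      have htk : (ids.take gn).isEmpty = false := by
        rw [List.isEmpty_eq_false_iff]
        intro h
        have : (ids.take gn).length = 0 := by rw [h]; rfl
        simp only [List.length_take] at this
        omega
      rw [List.filter_cons]
      simp only [htk, Bool.not_false, if_pos]
      rw [ih (ids.drop gn) hdropne (by simp only [List.length_drop]; omega)]
    · rw [tailG, dif_neg (by rintro ⟨_, h⟩; omega)]
      have : ids.isEmpty = false := List.isEmpty_eq_false_iff.mpr hne
      simp [this]

-- ===== VERDICT (by name: the statement is the Claim_ definition above) =====
theorem ordered_groups_from_ids_spec : Claim_equal_ordered_groups_from_ids := by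
  intro ids g th _ hpre
  unfold Spec_ordered_groups_from_ids
  have hg : 0 < g := hpre
  unfold ordered_groups_from_ids ordered_groups_from_ids_alt
  rw [if_neg (show ¬ g ≤ 0 by omega), if_neg (show ¬ g ≤ 0 by omega)]
  have hchunks :
      (PySem.List.pyRange 0 (ids.length : Int) g).map
        (fun start => PySem.List.slice ids (some start) (some (start + g)))
      = chunksOf g.toNat ids := by
    have := chunks_eq ids g hg ids.length 0 (by omega) (by omega)
    simpa using this
  by_cases hne : ids = []
  · subst hne
    have hr : PySem.List.pyRange 0 0 g = [] :=
      pyRange_pos_nil _ _ _ hg (by simp)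
    simp [hr]
  · rw [if_neg hne]
    by_cases hth : th
    · subst hth
      simp only [Bool.not_true, if_neg (by simp : ¬ (false = true))]
      have hloop := loopA_eq ids g hg ids.length 0 [] (by omega) (by omega)
      simp only [List.drop_zero, List.nil_append, Int.toNat_zero] at hloop
      rw [hloop]
      have hgn : 0 < g.toNat := by omega
      rw [tailG_filter g.toNat hgn ids.length ids hne (le_refl _)]
      rw [tailG_eq_merge g.toNat hgn ids.length ids hne (le_refl _)]
      have hmod : PySem.Int.mod (ids.length : Int) g = ((ids.length % g.toNat : Nat) : Int) := by
        rw [PySem.Int.mod_eq_emod_of_pos hg]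
        rw [show g = ((g.toNat : Nat) : Int) by omega]
        push_cast
        rfl
      simp only [hchunks, hmod, Bool.true_and]
      by_cases hcond : ids.length % g.toNat ≠ 0 ∧ 1 < (chunksOf g.toNat ids).length
      · rw [if_pos hcond]
        rw [if_pos (by
          simp only [Bool.and_eq_true, decide_eq_true_eq]
          exact ⟨by exact_mod_cast Int.natCast_ne_zero.mpr hcond.1, hcond.2⟩)]
        rfl
      · rw [if_neg hcond]
        rw [if_neg (by
          simp only [Bool.and_eq_true, decide_eq_true_eq]
          intro ⟨h1, h2⟩
          exact hcond ⟨by exact_mod_cast h1, h2⟩)]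
    · simp only [Bool.not_eq_true] at hth
      subst hth
      simp
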